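-- pv_equiv track=rewrite | github.com/Dowonida/BkJn | 프로그래머스/lv2/42888. 오픈채팅방/오픈채팅방.py | solution
-- ===== SOURCE A (Python) =====
-- def solution(record):
--     answer = []
--     dic={}
--     cs=[]
--     for i in record:
--         x=i.split()
--         a=x[0]
--         b=x[1]
--         if a!="Leave":
--             c=x[2]
--         if a=="Enter":
--             cs.append([b,"님이 들어왔습니다."])
--             dic[b]=c
--         elif a=="Change":
--             dic[b]=c
--         elif a=="Leave":
--             cs.append([b,"님이 나갔습니다."])
--
--     for a,b in cs:
--         answer.append(f'{dic[a]}{b}')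
--
--
--     return answer
-- ===== SOURCE B (Python) =====
-- def solution(record):
--     out = []    # messages, kept fully resolved at all times
--     refs = {}   # id -> [(index in out, suffix)] of messages showing this id's name
--     name = {}   # id -> current name
--     for line in record:
--         x = line.split()
--         a, b = x[0], x[1]
--         if a == "Enter" or a == "Change":
--             c = x[2]
--             name[b] = c
--             # retroactively rewrite every message already emitted for this id
--             for i, suf in refs.get(b, []):
--                 out[i] = c + suf
--         if a == "Enter":
--             refs.setdefault(b, []).append((len(out), "님이 들어왔습니다."))
--             out.append(c + "님이 들어왔습니다.")
--         elif a == "Leave":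
--             refs.setdefault(b, []).append((len(out), "님이 나갔습니다."))
--             out.append(name.get(b, "") + "님이 나갔습니다.")
--     return out
-- ===== Notes on version B (the rewrite author's own statement) =====
-- stated objective: alternative
-- what changed: B is an online/eager algorithm: it emits each Enter/Leave message fully resolved in one pass and, on every rename, retroactively patches the already-emitted messages via an id-to-output-indices index, instead of A's storing symbolic [id, suffix] events and resolving them all in a final replay pass over the dict.
import Mathlib
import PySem

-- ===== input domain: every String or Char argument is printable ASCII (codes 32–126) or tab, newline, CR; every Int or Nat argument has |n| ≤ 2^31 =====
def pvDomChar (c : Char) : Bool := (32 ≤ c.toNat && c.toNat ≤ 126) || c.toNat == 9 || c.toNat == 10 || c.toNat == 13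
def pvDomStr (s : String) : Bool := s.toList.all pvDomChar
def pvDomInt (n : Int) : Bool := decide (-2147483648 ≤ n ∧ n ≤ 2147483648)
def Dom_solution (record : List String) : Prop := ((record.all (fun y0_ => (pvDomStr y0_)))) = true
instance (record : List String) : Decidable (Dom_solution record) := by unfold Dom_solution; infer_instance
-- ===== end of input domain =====

-- B is an online algorithm: one pass emits each Enter/Leave message already resolved and patches
-- earlier messages retroactively on each rename, instead of A's symbolic event list + final replay.

-- ===== PORT A =====
-- one loop body of A: state is (dic, cs)
def solStepA (st : PySem.Dict String String × List (String × String)) (i : String) :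
    PySem.Dict String String × List (String × String) :=
  let x := PySem.Str.split₀ i
  let a := (PySem.List.pyGet? x 0).getD ""
  let b := (PySem.List.pyGet? x 1).getD ""
  -- Python binds c only when a != "Leave" (raises IndexError if x too short: excluded by Pre_)
  let c := if a ≠ "Leave" then (PySem.List.pyGet? x 2).getD "" else ""
  if a = "Enter" then (st.1.insert b c, st.2 ++ [(b, "님이 들어왔습니다.")])
  else if a = "Change" then (st.1.insert b c, st.2)
  else if a = "Leave" then (st.1, st.2 ++ [(b, "님이 나갔습니다.")])
  else st

def solution (record : List String) : List String :=
  let st := record.foldl solStepA (PySem.Dict.empty, [])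
  st.2.foldl (fun ans p => ans ++ [((st.1.get? p.1).getD "") ++ p.2]) []

-- ===== PORT B =====
-- one loop body of B: state is (out, refs, name); out-indices stored in refs are produced as
-- len(out) at append time, hence nonnegative, so Nat indices / List.set are exact for out[i] = ...
def solStepB (st : List String × PySem.Dict String (List (Nat × String)) × PySem.Dict String String)
    (line : String) : List String × PySem.Dict String (List (Nat × String)) × PySem.Dict String String :=
  let out := st.1
  let refs := st.2.1
  let name := st.2.2
  let x := PySem.Str.split₀ line
  let a := (PySem.List.pyGet? x 0).getD ""
  let b := (PySem.List.pyGet? x 1).getD ""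
  if a = "Enter" ∨ a = "Change" then
    let c := (PySem.List.pyGet? x 2).getD ""
    let name' := name.insert b c
    -- retroactive patching loop: for i, suf in refs.get(b, []): out[i] = c + suf
    let out' := ((refs.get? b).getD []).foldl (fun o p => o.set p.1 (c ++ p.2)) out
    if a = "Enter" then
      (out' ++ [c ++ "님이 들어왔습니다."],
       refs.insert b ((refs.get? b).getD [] ++ [(out'.length, "님이 들어왔습니다.")]), name')
    else (out', refs, name')
  else if a = "Leave" then
    (out ++ [((name.get? b).getD "") ++ "님이 나갔습니다."],
     refs.insert b ((refs.get? b).getD [] ++ [(out.length, "님이 나갔습니다.")]), name)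
  else st

def solution_alt (record : List String) : List String :=
  (record.foldl solStepB ([], PySem.Dict.empty, PySem.Dict.empty)).1

-- ===== PRECONDITION & SPEC =====
-- Pre_ excludes exactly the inputs on which Python A raises: lines with fewer than 2 whitespace
-- tokens (or fewer than 3 on a non-"Leave" line) raise IndexError, and an Enter/Leave id that no
-- Enter/Change line ever names raises KeyError in the replay loop.
def Pre_solution (record : List String) : Prop :=
  ∀ line ∈ record,
    2 ≤ (PySem.Str.split₀ line).length ∧
    ((PySem.Str.split₀ line)[0]? ≠ some "Leave" → 3 ≤ (PySem.Str.split₀ line).length) ∧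
    (((PySem.Str.split₀ line)[0]? = some "Enter" ∨ (PySem.Str.split₀ line)[0]? = some "Leave") →
      ∃ l ∈ record, ((PySem.Str.split₀ l)[0]? = some "Enter" ∨ (PySem.Str.split₀ l)[0]? = some "Change") ∧
        (PySem.Str.split₀ l)[1]? = (PySem.Str.split₀ line)[1]?)
instance (record : List String) : Decidable (Pre_solution record) := by unfold Pre_solution; infer_instance

def pvWitness_solution : List String := ["Enter uid1234 Muzi", "Leave uid1234", "Change uid1234 Prodo"]

def Spec_solution (record : List String) (out : List String) : Prop := out = solution_alt record
instance (record : List String) (out : List String) : Decidable (Spec_solution record out) := by unfold Spec_solution; infer_instance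

-- ===== CLAIM (what is proved, stated in full; the proofs are below) =====
def Claim_equal_solution : Prop := ∀ (record : List String), Dom_solution record → Pre_solution record → Spec_solution record (solution record)

-- ===== LEMMAS AND PROOFS =====
-- the [id, suffix] events A collects in cs, as a function of one line / the record
def evOf (line : String) : List (String × String) :=
  let x := PySem.Str.split₀ line
  let a := (PySem.List.pyGet? x 0).getD ""
  let b := (PySem.List.pyGet? x 1).getD ""
  if a = "Enter" then [(b, "님이 들어왔습니다.")]
  else if a = "Leave" then [(b, "님이 나갔습니다.")]
  else []

def solEvents (record : List String) : List (String × String) := record.flatMap evOf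

-- the name dict both programs maintain, as a function of the record
def dicStep (d : PySem.Dict String String) (line : String) : PySem.Dict String String :=
  let x := PySem.Str.split₀ line
  let a := (PySem.List.pyGet? x 0).getD ""
  if a = "Enter" ∨ a = "Change" then
    d.insert ((PySem.List.pyGet? x 1).getD "") ((PySem.List.pyGet? x 2).getD "")
  else d

def dicFold (record : List String) : PySem.Dict String String :=
  record.foldl dicStep PySem.Dict.empty

-- the (index, suffix) list B keeps in refs[b]: positions of b's events, offset by k
def refsOf : List (String × String) → String → Nat → List (Nat × String)
  | [], _, _ => []
  | p :: es, b, k => (if p.1 = b then [(k, p.2)] else []) ++ refsOf es b (k + 1)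

theorem refsOf_append (es es' : List (String × String)) (b : String) :
    ∀ k, refsOf (es ++ es') b k = refsOf es b k ++ refsOf es' b (k + es.length) := by
  induction es with
  | nil => intro k; simp [refsOf]
  | cons p t ih =>
    intro k
    simp only [List.cons_append, refsOf, ih (k + 1), List.append_assoc]
    have h1 : k + 1 + t.length = k + (t.length + 1) := by omega
    rw [h1]
    simp only [List.length_cons]

-- A's single pass = the name dict paired with the event list
theorem foldA_eq (record : List String) :
    ∀ (d : PySem.Dict String String) (cs : List (String × String)),
      record.foldl solStepA (d, cs) = (record.foldl dicStep d, cs ++ solEvents record) := by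
  induction record with
  | nil => intro d cs; simp [solEvents]
  | cons line rest ih =>
    intro d cs
    simp only [List.foldl_cons, solEvents, List.flatMap_cons]
    by_cases hE : ((PySem.List.pyGet? (PySem.Str.split₀ line) 0).getD "") = "Enter"
    · simp [solStepA, dicStep, evOf, hE, ih, solEvents]
    · by_cases hC : ((PySem.List.pyGet? (PySem.Str.split₀ line) 0).getD "") = "Change"
      · simp [solStepA, dicStep, evOf, hC, ih, solEvents]
      · by_cases hL : ((PySem.List.pyGet? (PySem.Str.split₀ line) 0).getD "") = "Leave"
        · simp [solStepA, dicStep, evOf, hL, ih, solEvents]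
        · simp [solStepA, dicStep, evOf, hE, hC, hL, ih, solEvents]

-- set inside the right part of an append (general list fact; not found in the library)
theorem set_append_add {α : Type} (l t : List α) (i : Nat) (v : α) :
    (l ++ t).set (l.length + i) v = l ++ t.set i v := by
  induction l with
  | nil => simp
  | cons x xs ih => simp [Nat.succ_add, ih]

-- patching all of b's positions rewrites exactly b's entries of the resolved map
theorem patch_eq (b c : String) :
    ∀ (es : List (String × String)) (out0 : List String) (f : String → String),
      (refsOf es b out0.length).foldl (fun o p => o.set p.1 (c ++ p.2))
          (out0 ++ es.map (fun p => f p.1 ++ p.2))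
        = out0 ++ es.map (fun p => (if p.1 = b then c else f p.1) ++ p.2) := by
  intro es
  induction es with
  | nil => intro out0 f; simp [refsOf]
  | cons p t ih =>
    intro out0 f
    by_cases hp : p.1 = b
    · have h2 := ih (out0 ++ [c ++ p.2]) f
      simp only [List.append_assoc, List.singleton_append, List.length_append, List.length_cons,
        List.length_nil, Nat.zero_add] at h2
      have hset := set_append_add out0 ((f b ++ p.2) :: List.map (fun q => f q.1 ++ q.2) t) 0 (c ++ p.2)
      simp only [Nat.add_zero, List.set_cons_zero] at hset
      simp only [refsOf, hp, if_true, List.map_cons, List.cons_append, List.nil_append,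
        List.foldl_cons, hset]
      rw [h2]
    · have h2 := ih (out0 ++ [f p.1 ++ p.2]) f
      simp only [List.append_assoc, List.singleton_append, List.length_append, List.length_cons,
        List.length_nil, Nat.zero_add] at h2
      simp only [refsOf, hp, if_false, List.map_cons, List.nil_append]
      rw [h2]

-- B's fold state characterised against the record
theorem foldB_char (record : List String) :
    (record.foldl solStepB ([], PySem.Dict.empty, PySem.Dict.empty)).2.2 = dicFold record ∧
    (∀ b, (((record.foldl solStepB ([], PySem.Dict.empty, PySem.Dict.empty)).2.1.get? b).getD [])
        = refsOf (solEvents record) b 0) ∧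
    (record.foldl solStepB ([], PySem.Dict.empty, PySem.Dict.empty)).1
      = (solEvents record).map (fun p => (((dicFold record).get? p.1).getD "") ++ p.2) := by
  induction record using List.reverseRecOn with
  | nil =>
    refine ⟨rfl, ?_, rfl⟩
    intro b; simp [solEvents, refsOf, PySem.Dict.get?_empty]
  | append_singleton l r ih =>
    obtain ⟨hn, hr, ho⟩ := ih
    rw [List.foldl_append, List.foldl_cons, List.foldl_nil]
    have hev : solEvents (l ++ [r]) = solEvents l ++ evOf r := by simp [solEvents]
    have hdic : dicFold (l ++ [r]) = dicStep (dicFold l) r := by simp [dicFold, List.foldl_append]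
    have hlen : (l.foldl solStepB ([], PySem.Dict.empty, PySem.Dict.empty)).1.length
        = (solEvents l).length := by rw [ho]; simp
    by_cases hE : ((PySem.List.pyGet? (PySem.Str.split₀ r) 0).getD "") = "Enter"
    · -- out' computed by the patch loop
      have hout' : (((l.foldl solStepB ([], PySem.Dict.empty, PySem.Dict.empty)).2.1.get?
              ((PySem.List.pyGet? (PySem.Str.split₀ r) 1).getD "")).getD []).foldl
            (fun o p => o.set p.1 (((PySem.List.pyGet? (PySem.Str.split₀ r) 2).getD "") ++ p.2))
            (l.foldl solStepB ([], PySem.Dict.empty, PySem.Dict.empty)).1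
          = (solEvents l).map (fun p =>
              ((((dicFold l).insert ((PySem.List.pyGet? (PySem.Str.split₀ r) 1).getD "")
                  ((PySem.List.pyGet? (PySem.Str.split₀ r) 2).getD "")).get? p.1).getD "") ++ p.2) := by
        rw [hr, ho]
        have := patch_eq ((PySem.List.pyGet? (PySem.Str.split₀ r) 1).getD "")
          ((PySem.List.pyGet? (PySem.Str.split₀ r) 2).getD "") (solEvents l) []
          (fun s => (((dicFold l).get? s).getD ""))
        simp only [List.nil_append, List.length_nil] at this
        rw [this]
        refine List.map_congr_left ?_
        intro p _
        by_cases h : p.1 = ((PySem.List.pyGet? (PySem.Str.split₀ r) 1).getD "")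
        · simp [ h]
        · simp [PySem.Dict.get?_insert, h]
      refine ⟨?_, ?_, ?_⟩
      · simp only [solStepB, hE, true_or, if_pos]
        rw [hn, hdic, dicStep]
        simp [hE]
      · intro b
        simp only [solStepB, hE, true_or, if_pos]
        rw [hev]
        have hevr : evOf r = [(((PySem.List.pyGet? (PySem.Str.split₀ r) 1).getD ""), "님이 들어왔습니다.")] := by
          simp [evOf, hE]
        rw [hevr, refsOf_append]
        rw [PySem.Dict.get?_insert]
        by_cases hb : b = ((PySem.List.pyGet? (PySem.Str.split₀ r) 1).getD "")
        · simp only [hb, if_pos, Option.getD_some]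
          rw [hout', hr]
          simp [refsOf]
        · simp only [if_neg hb]
          rw [hr]
          simp [refsOf]
          exact fun h => hb (Eq.symm h)
      · simp only [solStepB, hE, true_or, if_pos]
        rw [hev, hdic, dicStep]
        have hevr : evOf r = [(((PySem.List.pyGet? (PySem.Str.split₀ r) 1).getD ""), "님이 들어왔습니다.")] := by
          simp [evOf, hE]
        rw [hevr]
        simp only [hE, true_or, if_pos, List.map_append, List.map_cons,
          List.map_nil, hout']
        simp [PySem.Dict.get?_insert_self]
    · by_cases hC : ((PySem.List.pyGet? (PySem.Str.split₀ r) 0).getD "") = "Change"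
      · have hout' : (((l.foldl solStepB ([], PySem.Dict.empty, PySem.Dict.empty)).2.1.get?
                ((PySem.List.pyGet? (PySem.Str.split₀ r) 1).getD "")).getD []).foldl
              (fun o p => o.set p.1 (((PySem.List.pyGet? (PySem.Str.split₀ r) 2).getD "") ++ p.2))
              (l.foldl solStepB ([], PySem.Dict.empty, PySem.Dict.empty)).1
            = (solEvents l).map (fun p =>
                ((((dicFold l).insert ((PySem.List.pyGet? (PySem.Str.split₀ r) 1).getD "")
                    ((PySem.List.pyGet? (PySem.Str.split₀ r) 2).getD "")).get? p.1).getD "") ++ p.2) := by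
          rw [hr, ho]
          have := patch_eq ((PySem.List.pyGet? (PySem.Str.split₀ r) 1).getD "")
            ((PySem.List.pyGet? (PySem.Str.split₀ r) 2).getD "") (solEvents l) []
            (fun s => (((dicFold l).get? s).getD ""))
          simp only [List.nil_append, List.length_nil] at this
          rw [this]
          refine List.map_congr_left ?_
          intro p _
          by_cases h : p.1 = ((PySem.List.pyGet? (PySem.Str.split₀ r) 1).getD "")
          · simp [ h]
          · simp [PySem.Dict.get?_insert, h]
        have hevr : evOf r = [] := by simp [evOf, hC]
        refine ⟨?_, ?_, ?_⟩
        · simp only [solStepB, hC, String.reduceEq, or_true, if_true, if_false]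
          rw [hn, hdic, dicStep]
          simp [ hC]
        · intro b
          simp only [solStepB, hC, String.reduceEq, or_true, if_true, if_false]
          rw [hev, hevr, List.append_nil, hr]
        · simp only [solStepB, hC, String.reduceEq, or_true, if_true, if_false]
          rw [hev, hevr, List.append_nil, hdic, dicStep]
          simp only [hC, String.reduceEq, or_true, if_true]
          exact hout'
      · by_cases hL : ((PySem.List.pyGet? (PySem.Str.split₀ r) 0).getD "") = "Leave"
        · have hevr : evOf r = [(((PySem.List.pyGet? (PySem.Str.split₀ r) 1).getD ""), "님이 나갔습니다.")] := by
            simp [evOf, hL]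
          have hno : ¬ (((PySem.List.pyGet? (PySem.Str.split₀ r) 0).getD "") = "Enter" ∨
              ((PySem.List.pyGet? (PySem.Str.split₀ r) 0).getD "") = "Change") := by
            simp [hE, hC]
          refine ⟨?_, ?_, ?_⟩
          · simp only [solStepB, hL, String.reduceEq, or_self, if_true, if_false]
            rw [hn, hdic, dicStep]
            simp [hE, hC]
          · intro b
            simp only [solStepB, hL, String.reduceEq, or_self, if_true, if_false]
            rw [hev, hevr, refsOf_append, PySem.Dict.get?_insert]
            by_cases hb : b = ((PySem.List.pyGet? (PySem.Str.split₀ r) 1).getD "")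
            · simp only [hb, if_pos, Option.getD_some]
              rw [hr, hlen]
              simp [refsOf]
            · simp only [if_neg hb]
              rw [hr]
              simp [refsOf]
              exact fun h => hb (Eq.symm h)
          · simp only [solStepB, hL, String.reduceEq, or_self, if_true, if_false]
            rw [hev, hevr, hdic, dicStep]
            simp only [if_neg hno, List.map_append, List.map_cons, List.map_nil]
            rw [ho, hn]
        · have hevr : evOf r = [] := by simp [evOf, hE, hL]
          have hno : ¬ (((PySem.List.pyGet? (PySem.Str.split₀ r) 0).getD "") = "Enter" ∨
              ((PySem.List.pyGet? (PySem.Str.split₀ r) 0).getD "") = "Change") := by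
            simp [hE, hC]
          refine ⟨?_, ?_, ?_⟩
          · simp only [solStepB, if_neg hno, if_neg hL]
            rw [hn, hdic, dicStep]
            simp [hE, hC]
          · intro b
            simp only [solStepB, if_neg hno, if_neg hL]
            rw [hev, hevr, List.append_nil, hr]
          · simp only [solStepB, if_neg hno, if_neg hL]
            rw [hev, hevr, List.append_nil, hdic, dicStep]
            simp only [if_neg hno]
            exact ho

-- ===== VERDICT (by name: the statement is the Claim_ definition above) =====
theorem solution_spec : Claim_equal_solution := by
  intro record _ _
  show solution record = solution_alt record
  obtain ⟨-, -, hout⟩ := foldB_char record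
  simp only [solution, solution_alt, foldA_eq, hout, PySem.List.foldl_append_singleton_eq_map,
    List.nil_append, dicFold]

theorem pv_witness_ok : Dom_solution pvWitness_solution ∧ Pre_solution pvWitness_solution := by
  constructor <;> decide
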